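-- pv_equiv track=rewrite | github.com/AbdeI1/Archive | AdventOfCode/AdventOfCode/2020/Day 11/Day11Code.py | seesLeft
-- ===== SOURCE A (Python) =====
-- def seesLeft(i, j, f):
-- 	jnew = j - 1
-- 	while jnew >= 0:
-- 		if f[i][jnew] == "#":
-- 			return True
-- 		if f[i][jnew] == "L":
-- 			return False
-- 		jnew -= 1
-- 	return False
-- ===== SOURCE B (Python) =====
-- def seesLeft(i, j, f):
--     if j <= 0:
--         return False
--     seats = [c for c in f[i][:j] if c in ("#", "L")]
--     return bool(seats) and seats[-1] == "#"
-- ===== Notes on version B (the rewrite author's own statement) =====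
-- stated objective: simpler
-- what changed: Replaces A's explicit right-to-left index loop with early returns by filtering the row prefix f[i][:j] down to seat tiles and checking whether the last one is '#'.
import Mathlib
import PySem

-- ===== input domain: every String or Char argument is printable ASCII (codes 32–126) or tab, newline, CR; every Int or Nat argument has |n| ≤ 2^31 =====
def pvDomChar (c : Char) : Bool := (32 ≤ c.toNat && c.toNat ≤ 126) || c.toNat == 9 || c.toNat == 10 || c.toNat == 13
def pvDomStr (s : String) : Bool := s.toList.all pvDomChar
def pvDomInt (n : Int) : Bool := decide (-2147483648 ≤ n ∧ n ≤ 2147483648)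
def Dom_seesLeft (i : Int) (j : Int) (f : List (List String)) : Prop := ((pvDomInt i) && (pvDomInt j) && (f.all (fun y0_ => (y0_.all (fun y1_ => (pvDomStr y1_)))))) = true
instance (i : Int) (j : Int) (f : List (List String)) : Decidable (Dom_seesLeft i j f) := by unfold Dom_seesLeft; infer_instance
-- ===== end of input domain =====

-- B replaces A's explicit leftward index loop by a filter-the-prefix-and-look-at-its-last-seat
-- decomposition (objective: simpler); same return value on every input admitted by Pre_seesLeft.

-- ===== PORT A =====
-- the while loop of A: jnew runs n, n-1, …, 0 over the row f[i]
def seesLeftGo (row : List String) : Nat → Bool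
  | 0 =>
    if PySem.List.pyGetD row ((0 : Nat) : Int) "" = "#" then true
    else if PySem.List.pyGetD row ((0 : Nat) : Int) "" = "L" then false
    else false
  | m + 1 =>
    if PySem.List.pyGetD row ((m + 1 : Nat) : Int) "" = "#" then true
    else if PySem.List.pyGetD row ((m + 1 : Nat) : Int) "" = "L" then false
    else seesLeftGo row m

def seesLeft (i : Int) (j : Int) (f : List (List String)) : Bool :=
  if 0 ≤ j - 1 then seesLeftGo (PySem.List.pyGetD f i []) (j - 1).toNat else false

-- ===== PORT B =====
def seesLeft_alt (i : Int) (j : Int) (f : List (List String)) : Bool :=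
  if j ≤ 0 then false
  else
    let seats := (PySem.List.slice (PySem.List.pyGetD f i []) none (some j)).filter
      (fun c => c == "#" || c == "L")
    match seats.getLast? with
    | some c => c == "#"
    | none => false

-- ===== PRECONDITION & SPEC =====
-- Pre_ excludes exactly the inputs where A raises IndexError: when 0 < j A indexes f[i][j-1],
-- so the row index i must be in range and the row must have at least j elements.
def Pre_seesLeft (i : Int) (j : Int) (f : List (List String)) : Prop :=
  0 < j → PySem.Raise.InRange f.length i ∧ j ≤ ((PySem.List.pyGetD f i []).length : Int)
instance (i : Int) (j : Int) (f : List (List String)) : Decidable (Pre_seesLeft i j f) := by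
  unfold Pre_seesLeft; infer_instance

def pvWitness_seesLeft : Int × Int × List (List String) := (0, 2, [[".", "#", "L"]])

def Spec_seesLeft (i : Int) (j : Int) (f : List (List String)) (out : Bool) : Prop := out = seesLeft_alt i j f
instance (i : Int) (j : Int) (f : List (List String)) (out : Bool) : Decidable (Spec_seesLeft i j f out) := by unfold Spec_seesLeft; infer_instance

-- ===== CLAIM (what is proved, stated in full; the proofs are below) =====
def Claim_equal_seesLeft : Prop := ∀ (i : Int) (j : Int) (f : List (List String)), Dom_seesLeft i j f → Pre_seesLeft i j f → Spec_seesLeft i j f (seesLeft i j f)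

-- ===== LEMMAS AND PROOFS =====

-- the loop of A on a prefix of length n+1 equals "last seat of the filtered prefix"
theorem seesLeftGo_eq (row : List String) (n : Nat) (hn : n < row.length) :
    seesLeftGo row n =
      (match ((row.take (n + 1)).filter (fun c => c == "#" || c == "L")).getLast? with
        | some c => c == "#"
        | none => false) := by
  induction n with
  | zero =>
    simp only [seesLeftGo]
    simp only [PySem.List.pyGetD_natCast]
    rw [List.getD_eq_getElem _ _ hn]
    rcases row with _ | ⟨a, rest⟩
    · simp at hn
    · simp only [List.take, List.filter]
      by_cases h1 : a = "#"
      · simp [h1]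
      · by_cases h2 : a = "L"
        · simp [h2]
        · have hb : (a == "#" || a == "L") = false := by simp [h1, h2]
          simp [h1, h2, hb]
  | succ m ih =>
    simp only [seesLeftGo]
    simp only [PySem.List.pyGetD_natCast]
    rw [List.getD_eq_getElem _ _ hn]
    have htake : row.take (m + 1 + 1) = row.take (m + 1) ++ [row[m + 1]] :=
      List.take_succ_eq_append_getElem hn
    rw [htake, List.filter_append]
    by_cases h1 : row[m + 1] = "#"
    · simp [h1]
    · by_cases h2 : row[m + 1] = "L"
      · simp [h2]
      · have hp : (fun c => c == "#" || c == "L") row[m + 1] = false := by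
          simp [h1, h2]
        simp only [List.filter_cons, List.filter_nil, hp, if_neg h1, if_neg h2,
          Bool.false_eq_true, ite_false, List.append_nil]
        exact ih (by omega)

theorem seesLeft_eq_alt (i : Int) (j : Int) (f : List (List String))
    (hpre : Pre_seesLeft i j f) : seesLeft i j f = seesLeft_alt i j f := by
  unfold seesLeft seesLeft_alt
  by_cases hj : 0 < j
  · obtain ⟨-, hlen⟩ := hpre hj
    rw [if_pos (by omega), if_neg (by omega)]
    set row := PySem.List.pyGetD f i [] with hrow
    have hjn : j = ((j.toNat : Nat) : Int) := by omega
    have hslice : PySem.List.slice row none (some j) = row.take j.toNat := by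
      have h := PySem.List.slice_to_natCast (xs := row) (b := j.toNat)
      rw [← hjn] at h; exact h
    have hn : (j - 1).toNat < row.length := by omega
    have hsum : (j - 1).toNat + 1 = j.toNat := by omega
    rw [seesLeftGo_eq row _ hn, hsum, hslice]
  · rw [if_neg (by omega), if_pos (by omega)]

-- ===== VERDICT (by name: the statement is the Claim_ definition above) =====
theorem seesLeft_spec : Claim_equal_seesLeft := by
  intro i j f _ hpre
  unfold Spec_seesLeft
  exact seesLeft_eq_alt i j f hpre
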